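-- pv_equiv track=rewrite | github.com/imnarin0316/play_data | 프로그래머스/lv0/120843. 공 던지기/공 던지기.py | solution
-- ===== SOURCE A (Python) =====
-- def solution(numbers, k):
--     if len(numbers) % 2 == 0:
--         numbers_even = []
--         for num_even in range(0,len(numbers),2):
--             numbers_even.append(numbers[num_even])
--         return numbers_even[(k % len(numbers_even)) - 1]
--     elif len(numbers) % 2 != 0:
--         numbers_odd = []
--         for loop_cnt in range(2):
--             for num_odd_0 in range(loop_cnt,len(numbers),2):
--                 numbers_odd.append(numbers[num_odd_0])
--         return numbers_odd[(k % len(numbers_odd)) - 1]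
-- ===== SOURCE B (Python) =====
-- def solution(numbers, k):
--     return numbers[(2 * (k - 1)) % len(numbers)]
-- ===== Notes on version B (the rewrite author's own statement) =====
-- stated objective: simpler
-- what changed: B replaces A's construction of a full reordered list (one or two range-loops appending elements) followed by a modular lookup with the one-line direct index formula numbers[(2*(k-1)) % len(numbers)].
import Mathlib
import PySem

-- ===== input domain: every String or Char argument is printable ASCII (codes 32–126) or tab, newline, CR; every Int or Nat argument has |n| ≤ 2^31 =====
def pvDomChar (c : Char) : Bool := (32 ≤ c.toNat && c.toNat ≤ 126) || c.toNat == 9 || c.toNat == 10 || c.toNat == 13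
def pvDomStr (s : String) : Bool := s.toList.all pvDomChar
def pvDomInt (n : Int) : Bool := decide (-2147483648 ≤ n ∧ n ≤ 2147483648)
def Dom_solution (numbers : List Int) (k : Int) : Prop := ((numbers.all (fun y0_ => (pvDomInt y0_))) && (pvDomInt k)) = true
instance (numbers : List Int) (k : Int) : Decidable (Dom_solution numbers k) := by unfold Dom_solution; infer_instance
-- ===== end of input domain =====

-- B replaces A's list-building loops with the one-line direct modular index formula (simpler).

-- ===== PORT A =====
def solution (numbers : List Int) (k : Int) : Int :=
  if PySem.Int.mod (numbers.length : Int) 2 = 0 then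
    let numbers_even := (PySem.List.pyRange 0 (numbers.length : Int) 2).foldl
        (fun acc i => acc ++ [PySem.List.pyGetD numbers i 0]) []
    PySem.List.pyGetD numbers_even (PySem.Int.mod k (numbers_even.length : Int) - 1) 0
  else
    let numbers_odd := (PySem.List.pyRange 0 2 1).foldl
        (fun acc c => (PySem.List.pyRange c (numbers.length : Int) 2).foldl
            (fun acc2 i => acc2 ++ [PySem.List.pyGetD numbers i 0]) acc) []
    PySem.List.pyGetD numbers_odd (PySem.Int.mod k (numbers_odd.length : Int) - 1) 0

-- ===== PORT B =====
def solution_alt (numbers : List Int) (k : Int) : Int :=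
  PySem.List.pyGetD numbers (PySem.Int.mod (2 * (k - 1)) (numbers.length : Int)) 0

-- ===== PRECONDITION & SPEC =====
-- Pre_ excludes only numbers = [], on which A raises ZeroDivisionError (k % 0).
def Pre_solution (numbers : List Int) (k : Int) : Prop := numbers ≠ []
instance (numbers : List Int) (k : Int) : Decidable (Pre_solution numbers k) := by unfold Pre_solution; infer_instance
def pvWitness_solution : List Int × Int := ([1, 2, 3, 4, 5], 3)

def Spec_solution (numbers : List Int) (k : Int) (out : Int) : Prop := out = solution_alt numbers k
instance (numbers : List Int) (k : Int) (out : Int) : Decidable (Spec_solution numbers k out) := by unfold Spec_solution; infer_instance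

-- ===== CLAIM (what is proved, stated in full; the proofs are below) =====
def Claim_equal_solution : Prop := ∀ (numbers : List Int) (k : Int), Dom_solution numbers k → Pre_solution numbers k → Spec_solution numbers k (solution numbers k)

-- ===== LEMMAS AND PROOFS =====

theorem emod_sub_one (k m : Int) : (k % m - 1) % m = (k - 1) % m := by
  conv_lhs => rw [Int.emod_def k m]
  have h : k - m * (k / m) - 1 = (k - 1) + m * (-(k / m)) := by ring
  rw [h, Int.add_mul_emod_self_left]

theorem emod_two_mul (x n : Int) : (2 * (x % n)) % n = (2 * x) % n := by
  conv_lhs => rw [Int.emod_def x n]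
  have h : 2 * (x - n * (x / n)) = 2 * x + n * (-(2 * (x / n))) := by ring
  rw [h, Int.add_mul_emod_self_left]

theorem pyGetD_map_range_idx (g : Nat → Int) (m : Nat) (hm : 0 < m) (i : Int)
    (h1 : -1 ≤ i) (h2 : i < (m : Int)) :
    PySem.List.pyGetD ((List.range m).map g) i 0 = g (i % (m : Int)).toNat := by
  rcases lt_or_ge i 0 with hi | hi
  · have hi1 : i = -1 := by omega
    subst hi1
    have hmod : (-1 : Int) % (m : Int) = (m : Int) - 1 := by
      have h : (-1 : Int) = ((m : Int) - 1) + (m : Int) * (-1) := by ring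
      rw [h, Int.add_mul_emod_self_left, Int.emod_eq_of_lt (by omega) (by omega)]
    have hne : (List.range m).map g ≠ [] := by
      simp [List.range_eq_nil]; omega
    rw [PySem.List.pyGetD_neg_one _ _ hne, List.getLast_eq_getElem, hmod]
    simp
  · have hmod : i % (m : Int) = i := Int.emod_eq_of_lt hi h2
    rw [hmod, PySem.List.pyGetD_of_nonneg _ _ hi, List.getD_eq_getElem?_getD]
    have hlt : i.toNat < m := by omega
    simp [hlt]

theorem even_branch (xs : List Int) (m : Nat) (hm : xs.length = 2 * m) (hm0 : 0 < m) :
    (PySem.List.pyRange 0 (xs.length : Int) 2).map (fun i => PySem.List.pyGetD xs i 0)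
      = (List.range m).map (fun j => xs.getD (2 * j) 0) := by
  rw [PySem.List.pyRange_of_pos 0 _ (by norm_num)]
  have hif : (if (0 : Int) < (xs.length : Int) then (((xs.length : Int) - 0 + 2 - 1) / 2).toNat else 0) = m := by
    rw [if_pos (by exact_mod_cast by omega)]
    omega
  rw [hif, List.map_map]
  apply List.map_congr_left
  intro j hj
  simp only [Function.comp]
  have h2 : (0 : Int) + 2 * (j : Int) = ((2 * j : Nat) : Int) := by push_cast; ring
  rw [h2, PySem.List.pyGetD_natCast]

theorem odd_branch (xs : List Int) (m : Nat) (hm : xs.length = 2 * m + 1) :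
    (PySem.List.pyRange 0 (xs.length : Int) 2).map (fun i => PySem.List.pyGetD xs i 0)
        ++ (PySem.List.pyRange 1 (xs.length : Int) 2).map (fun i => PySem.List.pyGetD xs i 0)
      = (List.range (2 * m + 1)).map (fun t => xs.getD ((2 * t) % (2 * m + 1)) 0) := by
  rw [PySem.List.pyRange_of_pos 0 _ (by norm_num), PySem.List.pyRange_of_pos 1 _ (by norm_num)]
  have h0 : (if (0 : Int) < (xs.length : Int) then (((xs.length : Int) - 0 + 2 - 1) / 2).toNat else 0) = m + 1 := by
    rw [if_pos (by exact_mod_cast by omega)]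
    omega
  have h1 : (if (1 : Int) < (xs.length : Int) then (((xs.length : Int) - 1 + 2 - 1) / 2).toNat else 0) = m := by
    rcases Nat.eq_zero_or_pos m with h | h
    · rw [if_neg (by omega)]; omega
    · rw [if_pos (by exact_mod_cast by omega)]; omega
  rw [h0, h1]
  have hsplit : List.range (2 * m + 1) = List.range (m + 1) ++ (List.range m).map (fun x => (m + 1) + x) := by
    have h : 2 * m + 1 = (m + 1) + m := by omega
    rw [h, List.range_add]
  rw [hsplit, List.map_append, List.map_map, List.map_map, List.map_map]
  congr 1
  · apply List.map_congr_left
    intro j hj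
    have hj' : j < m + 1 := List.mem_range.mp hj
    simp only [Function.comp]
    have e1 : (0 : Int) + 2 * (j : Int) = ((2 * j : Nat) : Int) := by push_cast; ring
    rw [e1, PySem.List.pyGetD_natCast, Nat.mod_eq_of_lt (by omega)]
  · apply List.map_congr_left
    intro j hj
    have hj' : j < m := List.mem_range.mp hj
    simp only [Function.comp]
    have e2 : 2 * ((m + 1) + j) = (1 + 2 * j) + (2 * m + 1) := by ring
    rw [e2, Nat.add_mod_right, Nat.mod_eq_of_lt (by omega)]
    have e1 : (1 : Int) + 2 * (j : Int) = ((1 + 2 * j : Nat) : Int) := by push_cast; ring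
    rw [e1, PySem.List.pyGetD_natCast]

theorem solution_eq_alt (numbers : List Int) (k : Int) (hpre : numbers ≠ []) :
    solution numbers k = solution_alt numbers k := by
  have hn : 0 < numbers.length := List.length_pos_iff.mpr hpre
  unfold solution solution_alt
  rcases Nat.even_or_odd numbers.length with ⟨m, hm⟩ | ⟨m, hm⟩
  · -- even: length = m + m
    have hm' : numbers.length = 2 * m := by omega
    have hm0 : 0 < m := by omega
    rw [if_pos ((PySem.Int.mod_eq_zero_iff_dvd _ _).mpr ⟨(m : Int), by exact_mod_cast hm'⟩)]
    simp only [PySem.List.foldl_append_singleton_eq_map, List.nil_append]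
    rw [even_branch numbers m hm' hm0]
    have hlen : ((List.range m).map (fun j => numbers.getD (2 * j) 0)).length = m := by simp
    rw [hlen]
    have hmne : ((m : Nat) : Int) ≠ 0 := by exact_mod_cast hm0.ne'
    have hmpos : (0 : Int) < (m : Int) := by exact_mod_cast hm0
    rw [PySem.Int.mod_eq_emod_of_pos hmpos]
    have hb1 : 0 ≤ k % (m : Int) := Int.emod_nonneg k hmne
    have hb2 : k % (m : Int) < (m : Int) := Int.emod_lt_of_pos k hmpos
    rw [pyGetD_map_range_idx _ m hm0 _ (by omega) (by omega), emod_sub_one]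
    -- B side
    have hnpos : (0 : Int) < (numbers.length : Int) := by exact_mod_cast hn
    rw [PySem.Int.mod_eq_emod_of_pos hnpos]
    rw [PySem.List.pyGetD_of_nonneg _ _ (Int.emod_nonneg _ (by exact_mod_cast hn.ne'))]
    congr 1
    have he : (2 * (k - 1)) % (numbers.length : Int) = 2 * ((k - 1) % (m : Int)) := by
      have h2 : (numbers.length : Int) = 2 * (m : Int) := by exact_mod_cast hm'
      rw [h2, Int.mul_emod_mul_of_pos _ _ (by norm_num)]
    have hnn : 0 ≤ (k - 1) % (m : Int) := Int.emod_nonneg _ hmne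
    omega
  · -- odd: length = 2 * m + 1
    have hodd : ¬ PySem.Int.mod (numbers.length : Int) 2 = 0 := by
      rw [PySem.Int.mod_eq_zero_iff_dvd]
      rintro ⟨c, hc⟩
      omega
    rw [if_neg hodd]
    have hr01 : PySem.List.pyRange 0 2 1 = [0, 1] := by decide
    rw [hr01]
    simp only [List.foldl_cons, List.foldl_nil, PySem.List.foldl_append_singleton_eq_map,
      List.nil_append]
    rw [odd_branch numbers m hm]
    have hlen : ((List.range (2 * m + 1)).map
        (fun t => numbers.getD ((2 * t) % (2 * m + 1)) 0)).length = 2 * m + 1 := by simp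
    rw [hlen]
    have hN0 : 0 < 2 * m + 1 := by omega
    have hNpos : (0 : Int) < ((2 * m + 1 : Nat) : Int) := by exact_mod_cast hN0
    have hNne : ((2 * m + 1 : Nat) : Int) ≠ 0 := hNpos.ne'
    rw [PySem.Int.mod_eq_emod_of_pos hNpos]
    have hb1 : 0 ≤ k % ((2 * m + 1 : Nat) : Int) := Int.emod_nonneg k hNne
    have hb2 : k % ((2 * m + 1 : Nat) : Int) < ((2 * m + 1 : Nat) : Int) :=
      Int.emod_lt_of_pos k hNpos
    rw [pyGetD_map_range_idx _ (2 * m + 1) hN0 _ (by omega) (by omega), emod_sub_one]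
    -- B side
    have hnpos : (0 : Int) < (numbers.length : Int) := by exact_mod_cast hn
    rw [PySem.Int.mod_eq_emod_of_pos hnpos]
    rw [PySem.List.pyGetD_of_nonneg _ _ (Int.emod_nonneg _ (by exact_mod_cast hn.ne'))]
    congr 1
    set a : Int := (k - 1) % ((2 * m + 1 : Nat) : Int) with ha
    have hann : 0 ≤ a := Int.emod_nonneg _ hNne
    have halt : a < ((2 * m + 1 : Nat) : Int) := Int.emod_lt_of_pos _ hNpos
    have hc : ((2 * a.toNat % (2 * m + 1) : Nat) : Int) = (2 * (k - 1)) % (numbers.length : Int) := by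
      have hlen' : (numbers.length : Int) = ((2 * m + 1 : Nat) : Int) := by exact_mod_cast hm
      have h2 : ((2 * a.toNat : Nat) : Int) = 2 * a := by omega
      rw [Int.natCast_mod, h2, ha, emod_two_mul, hlen']
    have hml : 2 * a.toNat % (2 * m + 1) < 2 * m + 1 := Nat.mod_lt _ hN0
    omega

-- ===== VERDICT (by name: the statement is the Claim_ definition above) =====
theorem solution_spec : Claim_equal_solution := by
  intro numbers k _ hpre
  unfold Spec_solution
  exact solution_eq_alt numbers k hpre
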